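-- pv_equiv track=rewrite | github.com/Synagard/proyecto | progra.py | ocultar
-- ===== SOURCE A (Python) =====
-- def ocultar(definicion):
--     palabras = definicion.split()
--     return "   ".join(
--         palabra if len(palabra) == 2 else
--         "".join(
--             letra if i == 0 or i == len(palabra) - 1 else "_ "
--             for i, letra in enumerate(palabra)
--         ).strip()
--         for palabra in palabras
--     )
-- ===== SOURCE B (Python) =====
-- def ocultar(definicion):
--     resultado = []
--     for palabra in definicion.split():
--         if len(palabra) < 2:
--             resultado.append(palabra)
--         else:
--             resultado.append(palabra[0] + "_ " * (len(palabra) - 2) + palabra[-1])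
--     return "   ".join(resultado)
-- ===== Notes on version B (the rewrite author's own statement) =====
-- stated objective: simpler
-- what changed: Replaces the per-character enumerate/conditional inner loop plus the redundant strip with a closed-form per-word formula: first letter, underscore-blank repeated len-2 times, last letter.
import Mathlib
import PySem

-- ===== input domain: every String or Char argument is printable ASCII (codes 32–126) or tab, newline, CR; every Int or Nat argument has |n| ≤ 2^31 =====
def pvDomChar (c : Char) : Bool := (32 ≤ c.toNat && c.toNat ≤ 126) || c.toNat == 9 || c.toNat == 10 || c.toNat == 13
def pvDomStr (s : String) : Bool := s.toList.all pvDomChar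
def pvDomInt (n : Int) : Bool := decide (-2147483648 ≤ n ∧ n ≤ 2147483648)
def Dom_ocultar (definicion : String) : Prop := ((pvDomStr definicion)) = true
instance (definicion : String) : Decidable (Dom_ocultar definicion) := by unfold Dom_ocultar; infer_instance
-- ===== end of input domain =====

-- B replaces A's per-character enumerate/conditional inner loop (plus the redundant strip)
-- with a closed-form per-word formula first + "_ "*(len-2) + last; objective: simpler.

-- ===== PORT A =====
-- the generator expression computing one masked word
def pvMaskA (palabra : List Char) : List Char :=
  if palabra.length = 2 then palabra
  else PySem.Chars.strip (PySem.Chars.join []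
    ((PySem.List.enumerate palabra 0).map
      (fun p => if p.1 = 0 ∨ p.1 = (palabra.length : Int) - 1 then [p.2] else ['_', ' '])))

def ocultar (definicion : String) : String :=
  String.ofList (PySem.Chars.join ("   ".toList)
    ((PySem.Chars.split₀ definicion.toList).map pvMaskA))

-- ===== PORT B =====
-- one masked word by the closed-form formula (the defaults of pyGetD are unreachable: len ≥ 2)
def pvMaskB (palabra : List Char) : List Char :=
  if palabra.length < 2 then palabra
  else [PySem.List.pyGetD palabra 0 'a']
    ++ PySem.List.pyRepeat ['_', ' '] ((palabra.length : Int) - 2)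
    ++ [PySem.List.pyGetD palabra (-1) 'a']

def ocultar_alt (definicion : String) : String :=
  String.ofList (PySem.Chars.join ("   ".toList)
    ((PySem.Chars.split₀ definicion.toList).foldl
      (fun resultado palabra => resultado ++ [pvMaskB palabra]) []))

-- ===== PRECONDITION & SPEC =====
def Spec_ocultar (definicion : String) (out : String) : Prop := out = ocultar_alt definicion
instance (definicion : String) (out : String) : Decidable (Spec_ocultar definicion out) := by unfold Spec_ocultar; infer_instance

-- ===== CLAIM (what is proved, stated in full; the proofs are below) =====
def Claim_equal_ocultar : Prop := ∀ (definicion : String), Dom_ocultar definicion → Spec_ocultar definicion (ocultar definicion)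

-- ===== LEMMAS AND PROOFS =====

-- every word produced by split() is nonempty and whitespace-free
lemma split₀_go_prop (s cur : List Char) (acc : List (List Char))
    (hacc : ∀ w ∈ acc, w ≠ [] ∧ ∀ c ∈ w, PySem.Chars.isspace c = false)
    (hcur : ∀ c ∈ cur, PySem.Chars.isspace c = false) :
    ∀ w ∈ PySem.Chars.split₀.go s cur acc, w ≠ [] ∧ ∀ c ∈ w, PySem.Chars.isspace c = false := by
  induction s generalizing cur acc with
  | nil =>
    intro w hw
    by_cases h : cur.isEmpty
    · simp only [PySem.Chars.split₀.go, h, if_pos] at hw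
      simp at hw
      exact hacc w hw
    · simp only [PySem.Chars.split₀.go, h] at hw
      simp at hw
      rcases hw with hw | hw
      · exact hacc w hw
      · subst hw
        refine ⟨by simpa [List.isEmpty_iff] using h, ?_⟩
        intro c hc; exact hcur c (by simpa using hc)
  | cons c rest ih =>
    intro w hw
    by_cases hs : PySem.Chars.isspace c
    · by_cases h : cur.isEmpty
      · simp only [PySem.Chars.split₀.go, hs, h, if_pos] at hw
        exact ih [] acc hacc (by simp) w hw
      · simp only [PySem.Chars.split₀.go, hs, h, if_pos] at hw
        refine ih [] (cur.reverse :: acc) ?_ (by simp) w hw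
        intro v hv
        rcases List.mem_cons.mp hv with hv | hv
        · subst hv
          refine ⟨by simpa [List.isEmpty_iff] using h, ?_⟩
          intro d hd; exact hcur d (by simpa using hd)
        · exact hacc v hv
    · simp only [PySem.Chars.split₀.go, hs] at hw
      refine ih (c :: cur) acc hacc ?_ w hw
      intro d hd
      rcases List.mem_cons.mp hd with hd | hd
      · subst hd; simpa using hs
      · exact hcur d hd

lemma split₀_prop (s : List Char) :
    ∀ w ∈ PySem.Chars.split₀ s, w ≠ [] ∧ ∀ c ∈ w, PySem.Chars.isspace c = false := by
  simpa [PySem.Chars.split₀] using split₀_go_prop s [] [] (by simp) (by simp)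

lemma join_nil_flatten (l : List (List Char)) : PySem.Chars.join [] l = l.flatten := by
  induction l with
  | nil => rfl
  | cons x xs ih =>
    cases xs with
    | nil => simp [PySem.Chars.join, List.intercalate, List.intersperse]
    | cons y ys =>
      simp only [PySem.Chars.join, List.intercalate] at ih ⊢
      simp [List.intersperse, ih]

lemma strip_noop (a : Char) (mid : List Char) (b : Char)
    (ha : PySem.Chars.isspace a = false) (hb : PySem.Chars.isspace b = false) :
    PySem.Chars.strip (a :: mid ++ [b]) = a :: mid ++ [b] := by
  simp [PySem.Chars.strip, PySem.Chars.lstrip, PySem.Chars.rstrip, ha, hb]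

lemma strip_single (c : Char) (hc : PySem.Chars.isspace c = false) :
    PySem.Chars.strip [c] = [c] := by
  simp [PySem.Chars.strip, PySem.Chars.lstrip, PySem.Chars.rstrip, List.dropWhile, hc]

lemma mask_eq (w : List Char) (hne : w ≠ [])
    (hws : ∀ c ∈ w, PySem.Chars.isspace c = false) : pvMaskA w = pvMaskB w := by
  obtain ⟨a, t, rfl⟩ := List.exists_cons_of_ne_nil hne
  cases t with
  | nil =>
    -- single letter
    have ha := hws a (by simp)
    simp [pvMaskA, pvMaskB, PySem.List.enumerate, strip_single a ha]
  | cons b rest =>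
    obtain ⟨m, z, hmz⟩ := (List.eq_nil_or_concat (b :: rest)).resolve_left (by simp)
    simp only [List.concat_eq_append] at hmz
    rw [hmz]
    have hz : PySem.Chars.isspace z = false := by
      apply hws; rw [hmz]; simp
    have ha : PySem.Chars.isspace a = false := hws a (by simp)
    by_cases hm : m = []
    · -- two letters
      subst hm
      simp [pvMaskA, pvMaskB, PySem.List.pyRepeat, PySem.List.pyGetD, PySem.List.pyGet?,
        PySem.List.pyIdx?]
    · -- length ≥ 3
      have hmlen : 1 ≤ m.length := by
        cases m with
        | nil => exact absurd rfl hm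
        | cons _ _ => simp
      have hlen : (a :: (m ++ [z])).length = m.length + 2 := by simp
      have hlen2 : (a :: (m ++ [z])).length ≠ 2 := by rw [hlen]; omega
      have hmap : ((PySem.List.enumerate m 1).map
          (fun p : Int × Char =>
            if p.1 = 0 ∨ p.1 = ((a :: (m ++ [z])).length : Int) - 1 then [p.2] else ['_', ' ']))
          = List.replicate m.length ['_', ' '] := by
        rw [List.eq_replicate_iff]
        constructor
        · simp [PySem.List.length_enumerate]
        · intro x hx
          rcases List.mem_map.mp hx with ⟨p, hp, hfx⟩
          rcases (PySem.List.mem_enumerate_iff m 1 p).mp hp with ⟨k, hk, rfl⟩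
          rw [← hfx]
          have h0 : (1 : Int) + k ≠ 0 := by omega
          have h1 : ¬((1 : Int) + k = (m.length : Int) + 1) := by omega
          simp [h0, h1]
      have henum : PySem.List.enumerate (a :: (m ++ [z])) 0
          = (0, a) :: (PySem.List.enumerate m 1 ++ [((1 : Int) + m.length, z)]) := by
        rw [PySem.List.enumerate_cons, PySem.List.enumerate_append, PySem.List.enumerate_cons,
          PySem.List.enumerate_nil]
        norm_num
      have hzidx : ((1 : Int) + m.length = ((a :: (m ++ [z])).length : Int) - 1) := by
        rw [hlen]; push_cast; omega
      have hrep : PySem.List.pyRepeat ['_', ' '] (((a :: (m ++ [z])).length : Int) - 2)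
          = (List.replicate m.length ['_', ' ']).flatten := by
        have h2 : (((m.length + 2 : Nat) : Int) - 2).toNat = m.length := by omega
        rw [PySem.List.pyRepeat, hlen, h2]
      have hget0 : PySem.List.pyGetD (a :: (m ++ [z])) 0 'a' = a := by
        have hpos : (0 : Int) ≤ (m.length : Int) + 1 := by omega
        simp [PySem.List.pyGetD, PySem.List.pyGet?, PySem.List.pyIdx?, hpos]
      have hgetl : PySem.List.pyGetD (a :: (m ++ [z])) (-1) 'a' = z := by
        simp [PySem.List.pyGetD, PySem.List.pyGet?, PySem.List.pyIdx?]
      rw [pvMaskA, if_neg hlen2, henum, pvMaskB, if_neg (by rw [hlen]; omega),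
        hget0, hgetl, hrep, List.map_cons, List.map_append, hmap, List.map_singleton]
      have hstrip := strip_noop a ((List.replicate m.length ['_', ' ']).flatten) z ha hz
      simp [hzidx, join_nil_flatten]
      exact hstrip

-- ===== VERDICT (by name: the statement is the Claim_ definition above) =====
theorem ocultar_spec : Claim_equal_ocultar := by
  intro s _
  unfold Spec_ocultar ocultar ocultar_alt
  rw [PySem.List.foldl_append_singleton_eq_map]
  congr 2
  exact List.map_congr_left fun w hw =>
    mask_eq w (split₀_prop s.toList w hw).1 (split₀_prop s.toList w hw).2
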